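-- pv_equiv track=rewrite | github.com/YuhangWuAI/RAGbase | evaluation/evaluate.py | extract_prediction_steps
-- ===== SOURCE A (Python) =====
-- def extract_prediction_steps(response):
--     steps = []
--     lines = response.splitlines()
--     capture = False
--     for line in lines:
--         if "[" in line:
--             capture = True
--         if capture:
--             line = line.strip().strip('",')
--             if line:
--                 steps.append(line)
--         if "]" in line:
--             break
--     if "EOF" not in steps:
--         steps.append("EOF")
--     return steps
-- ===== SOURCE B (Python) =====
-- def extract_prediction_steps(response):
--     lines = response.splitlines()
--     start = next((i for i, l in enumerate(lines) if "[" in l), None)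
--     end = next((i for i, l in enumerate(lines) if "]" in l), None)
--     if start is None or (end is not None and end < start):
--         return ["EOF"]
--     region = lines[start:] if end is None else lines[start:end + 1]
--     steps = [s for s in (l.strip().strip('",') for l in region) if s]
--     if "EOF" not in steps:
--         steps.append("EOF")
--     return steps
-- ===== Notes on version B (the rewrite author's own statement) =====
-- stated objective: alternative
-- what changed: Replaces A's single stateful scan (capture flag, in-place reassignment, break) by an index-based decomposition: locate the first '['-line and first ']'-line up front, slice the bracketed region, then clean/filter it with a comprehension.
import Mathlib
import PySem

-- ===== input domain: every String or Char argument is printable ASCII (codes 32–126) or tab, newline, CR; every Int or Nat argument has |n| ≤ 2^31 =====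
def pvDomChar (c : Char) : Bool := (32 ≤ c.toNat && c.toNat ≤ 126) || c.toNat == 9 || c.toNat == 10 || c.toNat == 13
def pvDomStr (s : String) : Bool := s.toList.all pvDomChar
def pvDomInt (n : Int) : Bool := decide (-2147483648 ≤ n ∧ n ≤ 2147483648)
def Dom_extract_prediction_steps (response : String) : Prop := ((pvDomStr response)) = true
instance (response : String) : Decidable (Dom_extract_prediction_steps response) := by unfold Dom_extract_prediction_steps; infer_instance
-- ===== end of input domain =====

-- B re-decomposes A's stateful capture/break scan into "find the '[' and ']' line indices, slice the region, clean and filter it"; same cost, no speed claim.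

-- ===== PORT A =====
-- the for-loop of A: state = (accumulated steps, capture flag); returning the list = the break / loop end
def pvLoopA : List String → List String → Bool → List String
  | [], steps, _ => steps
  | line :: rest, steps, capture =>
    let capture := if PySem.Str.isIn "[" line then true else capture
    if capture then
      let line := PySem.Str.stripChars (PySem.Str.strip line) "\","
      let steps := if line ≠ "" then steps ++ [line] else steps
      if PySem.Str.isIn "]" line then steps else pvLoopA rest steps capture
    else
      if PySem.Str.isIn "]" line then steps else pvLoopA rest steps capture

def extract_prediction_steps (response : String) : List String :=
  let lines := PySem.Str.splitlines response
  let steps := pvLoopA lines [] false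
  if "EOF" ∈ steps then steps else steps ++ ["EOF"]

-- ===== PORT B =====
def pvCleanB (l : String) : String := PySem.Str.stripChars (PySem.Str.strip l) "\","

def pvStepsB (region : List String) : List String :=
  (region.map pvCleanB).filter (fun s => s ≠ "")

def pvFinishB (steps : List String) : List String :=
  if "EOF" ∈ steps then steps else steps ++ ["EOF"]

def extract_prediction_steps_alt (response : String) : List String :=
  let lines := PySem.Str.splitlines response
  match lines.findIdx? (fun l => PySem.Str.isIn "[" l) with
  | none => ["EOF"]
  | some start =>
    match lines.findIdx? (fun l => PySem.Str.isIn "]" l) with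
    | none => pvFinishB (pvStepsB (PySem.List.slice lines (some (start : Int)) none))
    | some stop =>
      if stop < start then ["EOF"]
      else pvFinishB (pvStepsB (PySem.List.slice lines (some (start : Int)) (some ((stop : Int) + 1))))

-- ===== PRECONDITION & SPEC =====
def Spec_extract_prediction_steps (response : String) (out : List String) : Prop := out = extract_prediction_steps_alt response
instance (response : String) (out : List String) : Decidable (Spec_extract_prediction_steps response out) := by unfold Spec_extract_prediction_steps; infer_instance

-- ===== CLAIM (what is proved, stated in full; the proofs are below) =====
def Claim_equal_extract_prediction_steps : Prop := ∀ (response : String), Dom_extract_prediction_steps response → Spec_extract_prediction_steps response (extract_prediction_steps response)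

-- ===== LEMMAS AND PROOFS =====

-- dropping a prefix of characters that are not c never changes whether c occurs
theorem pv_mem_dropWhile {p : Char → Bool} {c : Char} (hc : p c = false) :
    ∀ l : List Char, c ∈ List.dropWhile p l ↔ c ∈ l
  | [] => by simp
  | a :: l => by
    by_cases h : p a
    · rw [List.dropWhile_cons_of_pos h, pv_mem_dropWhile hc l]
      simp only [List.mem_cons]
      constructor
      · exact Or.inr
      · rintro (rfl | h2)
        · exact absurd h (by simp [hc])
        · exact h2
    · rw [List.dropWhile_cons_of_neg h]

theorem pv_singleton_infix {c : Char} {l : List Char} : [c] <:+: l ↔ c ∈ l := by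
  constructor
  · intro h
    exact h.sublist.mem (by simp)
  · intro h
    obtain ⟨s, t, rfl⟩ := List.append_of_mem h
    exact ⟨s, t, by simp⟩

theorem pv_mem_clean (s : List Char) :
    ']' ∈ PySem.Chars.stripChars (PySem.Chars.strip s) ['"', ','] ↔ ']' ∈ s := by
  simp only [PySem.Chars.stripChars, PySem.Chars.strip, PySem.Chars.rstrip, PySem.Chars.lstrip]
  rw [List.mem_reverse, pv_mem_dropWhile (by decide), List.mem_reverse,
      pv_mem_dropWhile (by decide), List.mem_reverse, pv_mem_dropWhile (by decide),
      List.mem_reverse, pv_mem_dropWhile (by decide)]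

-- cleaning a line (strip().strip('",')) does not change whether it contains "]"
theorem pv_isIn_clean (line : String) :
    PySem.Str.isIn "]" (PySem.Str.stripChars (PySem.Str.strip line) "\",") = PySem.Str.isIn "]" line := by
  have h1 : ∀ s : String, PySem.Str.isIn "]" s = true ↔ ']' ∈ s.toList := by
    intro s
    rw [PySem.Str.isIn_iff_infix, show "]".toList = [']'] from rfl, pv_singleton_infix]
  rw [Bool.eq_iff_iff, h1, h1]
  have h2 : (PySem.Str.stripChars (PySem.Str.strip line) "\",").toList
      = PySem.Chars.stripChars (PySem.Chars.strip line.toList) ['"', ','] := by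
    simp [PySem.Str.stripChars, PySem.Str.strip, String.toList_ofList]
  rw [h2]
  exact pv_mem_clean line.toList

-- capture phase of A's loop: it cleans/keeps every line up to and including the first "]" line
theorem pv_loop_true : ∀ (lines steps : List String),
    pvLoopA lines steps true =
      match lines.findIdx? (fun l => PySem.Str.isIn "]" l) with
      | none => steps ++ pvStepsB lines
      | some e => steps ++ pvStepsB (lines.take (e + 1))
  | [], steps => by simp [pvLoopA, pvStepsB]
  | line :: rest, steps => by
    rw [pvLoopA]
    simp only [ite_self]
    rw [pv_isIn_clean line]
    rw [List.findIdx?_cons]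
    by_cases h : PySem.Str.isIn "]" line
    · simp only [h, if_pos]
      by_cases hne : PySem.Str.stripChars (PySem.Str.strip line) "\"," ≠ ""
      · simp [hne, pvStepsB, pvCleanB]
      · simp only [ne_eq, not_not] at hne
        simp [hne, pvStepsB, pvCleanB]
    · simp only [h, if_false, Bool.false_eq_true]
      rw [pv_loop_true rest]
      cases he : rest.findIdx? (fun l => PySem.Str.isIn "]" l) with
      | none =>
        by_cases hne : PySem.Str.stripChars (PySem.Str.strip line) "\"," ≠ ""
        · simp [hne, pvStepsB, pvCleanB]
        · simp only [ne_eq, not_not] at hne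
          simp [hne, pvStepsB, pvCleanB]
      | some e =>
        by_cases hne : PySem.Str.stripChars (PySem.Str.strip line) "\"," ≠ ""
        · simp [hne, pvStepsB, pvCleanB, List.take_succ_cons]
        · simp only [ne_eq, not_not] at hne
          simp [hne, pvStepsB, pvCleanB, List.take_succ_cons]

-- before capture: A skips lines (breaking on "]") until the first "[" line, then runs the capture phase
theorem pv_loop_false : ∀ (lines steps : List String),
    pvLoopA lines steps false =
      match lines.findIdx? (fun l => PySem.Str.isIn "[" l),
            lines.findIdx? (fun l => PySem.Str.isIn "]" l) with
      | none, _ => steps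
      | some s, none => steps ++ pvStepsB (lines.drop s)
      | some s, some e =>
          if e < s then steps else steps ++ pvStepsB ((lines.drop s).take (e + 1 - s))
  | [], steps => by simp [pvLoopA]
  | line :: rest, steps => by
    cases hb : PySem.Str.isIn "[" line with
    | true =>
      have hb' : PySem.Chars.isIn ['['] line.toList = true := by simpa using hb
      have hstep : pvLoopA (line :: rest) steps false = pvLoopA (line :: rest) steps true := by
        rw [pvLoopA, pvLoopA, hb]; simp
      have hF0 : List.findIdx? (fun l => PySem.Str.isIn "[" l) (line :: rest) = some 0 := by
        simp [List.findIdx?_cons, hb']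
      rw [hstep, pv_loop_true, hF0]
      cases he : List.findIdx? (fun l => PySem.Str.isIn "]" l) (line :: rest) with
      | none => simp
      | some e => simp
    | false =>
      have hb' : PySem.Chars.isIn ['['] line.toList = false := by simpa using hb
      have hF : List.findIdx? (fun l => PySem.Str.isIn "[" l) (line :: rest)
          = Option.map (fun i => i + 1) (List.findIdx? (fun l => PySem.Str.isIn "[" l) rest) := by
        simp [List.findIdx?_cons, hb']
      cases h : PySem.Str.isIn "]" line with
      | true =>
        have h' : PySem.Chars.isIn [']'] line.toList = true := by simpa using h
        have hstep : pvLoopA (line :: rest) steps false = steps := by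
          rw [pvLoopA, hb, h]; simp
        have hG0 : List.findIdx? (fun l => PySem.Str.isIn "]" l) (line :: rest) = some 0 := by
          simp [List.findIdx?_cons, h']
        rw [hstep, hF, hG0]
        cases hs : List.findIdx? (fun l => PySem.Str.isIn "[" l) rest with
        | none => simp
        | some s => simp
      | false =>
        have h' : PySem.Chars.isIn [']'] line.toList = false := by simpa using h
        have hstep : pvLoopA (line :: rest) steps false = pvLoopA rest steps false := by
          rw [pvLoopA, hb, h]; simp
        have hG : List.findIdx? (fun l => PySem.Str.isIn "]" l) (line :: rest)
            = Option.map (fun i => i + 1) (List.findIdx? (fun l => PySem.Str.isIn "]" l) rest) := by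
          simp [List.findIdx?_cons, h']
        rw [hstep, pv_loop_false rest, hF, hG]
        cases hs : List.findIdx? (fun l => PySem.Str.isIn "[" l) rest with
        | none => simp
        | some s =>
          cases he : List.findIdx? (fun l => PySem.Str.isIn "]" l) rest with
          | none => simp [List.drop_succ_cons]
          | some e =>
            simp only [Option.map_some]
            by_cases hlt : e < s
            · rw [if_pos hlt, if_pos (show e + 1 < s + 1 by omega)]
            · rw [if_neg hlt, if_neg (show ¬ e + 1 < s + 1 by omega), List.drop_succ_cons,
                  show e + 1 + 1 - (s + 1) = e + 1 - s from by omega]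

-- ===== VERDICT (by name: the statement is the Claim_ definition above) =====
theorem extract_prediction_steps_spec : Claim_equal_extract_prediction_steps := by
  unfold Claim_equal_extract_prediction_steps
  intro response _
  unfold Spec_extract_prediction_steps extract_prediction_steps extract_prediction_steps_alt
  dsimp only
  rw [pv_loop_false]
  cases hs : (PySem.Str.splitlines response).findIdx? (fun l => PySem.Str.isIn "[" l) with
  | none => simp
  | some s =>
    cases he : (PySem.Str.splitlines response).findIdx? (fun l => PySem.Str.isIn "]" l) with
    | none =>
      dsimp only
      rw [PySem.List.slice_from_natCast]
      simp [pvFinishB]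
    | some e =>
      dsimp only
      by_cases hlt : e < s
      · simp [hlt]
      · rw [show ((e : Int) + 1) = ((e + 1 : Nat) : Int) from by push_cast; ring,
            PySem.List.slice_natCast]
        simp [hlt, pvFinishB]
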